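-- pv_equiv track=rewrite | github.com/Aarushi-ai/ransomware-defense-system | radar_x/RADAR_DEMO/Stage3_Mitigate/attack_chain_tracker.py | _get_recommended_actions
-- ===== SOURCE A (Python) =====
-- from typing import List, Dict
--
-- def _get_recommended_actions(predicted_techniques: List[Dict]) -> List[str]:
--     """Generate recommended mitigation actions"""
--     actions = []
--
--     for tech in predicted_techniques:
--         tech_id = tech["id"]
--
--         if tech_id == "T1490":  # Inhibit System Recovery
--             actions.append("URGENT: Block access to shadow copies")
--             actions.append("Protect backup systems immediately")
--
--         elif tech_id == "T1486":  # Data Encryption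
--             actions.append("CRITICAL: Lock all sensitive folders NOW")
--             actions.append("Isolate system from network")
--             actions.append("Kill suspicious processes immediately")
--
--         elif tech_id == "T1083":  # File Discovery
--             actions.append("Monitor file system access patterns")
--             actions.append("Enable honeypot file alerts")
--
--         elif tech_id == "T1055":  # Process Injection
--             actions.append("Monitor process creation/injection")
--             actions.append("Enable process integrity checks")
--
--     return list(set(actions)) if actions else ["Continue enhanced monitoring"]
-- ===== SOURCE B (Python) =====
-- TECH_ACTIONS = {
--     "T1490": ["URGENT: Block access to shadow copies",
--               "Protect backup systems immediately"],
--     "T1486": ["CRITICAL: Lock all sensitive folders NOW",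
--               "Isolate system from network",
--               "Kill suspicious processes immediately"],
--     "T1083": ["Monitor file system access patterns",
--               "Enable honeypot file alerts"],
--     "T1055": ["Monitor process creation/injection",
--               "Enable process integrity checks"],
-- }
--
--
-- def _get_recommended_actions(predicted_techniques):
--     """Generate recommended mitigation actions (table-driven, dedup on ids)."""
--     seen = []
--     for tech in predicted_techniques:
--         tid = tech["id"]
--         if tid in TECH_ACTIONS and tid not in seen:
--             seen.append(tid)
--     if not seen:
--         return ["Continue enhanced monitoring"]
--     return [action for tid in seen for action in TECH_ACTIONS[tid]]
-- ===== Notes on version B (the rewrite author's own statement) =====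
-- stated objective: alternative
-- what changed: Instead of appending action strings per technique occurrence and deduplicating the action list with list(set(...)) at the end, B deduplicates the technique ids themselves in one table-driven pass (first occurrence of each known id) and then emits each id's fixed action block exactly once; output equals A's as a set.
import Mathlib
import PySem

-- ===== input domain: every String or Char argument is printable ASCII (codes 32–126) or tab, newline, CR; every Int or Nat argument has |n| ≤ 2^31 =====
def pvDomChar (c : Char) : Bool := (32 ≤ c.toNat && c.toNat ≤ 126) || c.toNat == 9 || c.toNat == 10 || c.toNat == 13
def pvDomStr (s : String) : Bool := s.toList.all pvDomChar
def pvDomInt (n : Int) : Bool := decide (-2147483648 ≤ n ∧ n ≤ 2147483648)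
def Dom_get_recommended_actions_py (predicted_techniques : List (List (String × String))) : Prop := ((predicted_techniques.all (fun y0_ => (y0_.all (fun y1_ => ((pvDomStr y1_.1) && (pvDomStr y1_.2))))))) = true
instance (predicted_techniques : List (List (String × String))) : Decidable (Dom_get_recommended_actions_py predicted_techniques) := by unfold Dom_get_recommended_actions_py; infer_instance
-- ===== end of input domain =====

-- B replaces the if/elif ladder that appends action strings per occurrence (deduplicated at the
-- end with list(set(...))) by a single pass that deduplicates technique IDS (first occurrence of
-- each known id) and emits each id's fixed action block once; equal as a set of actions.
-- Equivalence is about the RETURN value compared as a Python set (the order of list(set(...)) is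
-- hash order and is not modelled; PySem.Set.ofList keeps first occurrences).

-- ===== PORT A =====
-- step of A's for-loop; tech["id"] is ported as getD with dummy default "" — the KeyError on a
-- missing "id" key is excluded by Pre_ below ("" matches no branch, so behaviour is unchanged).
def pvStepA (actions : List String) (tech : List (String × String)) : List String :=
  let tech_id := (PySem.Dict.mk tech).getD "id" ""
  if tech_id = "T1490" then
    actions ++ ["URGENT: Block access to shadow copies", "Protect backup systems immediately"]
  else if tech_id = "T1486" then
    actions ++ ["CRITICAL: Lock all sensitive folders NOW", "Isolate system from network",
                "Kill suspicious processes immediately"]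
  else if tech_id = "T1083" then
    actions ++ ["Monitor file system access patterns", "Enable honeypot file alerts"]
  else if tech_id = "T1055" then
    actions ++ ["Monitor process creation/injection", "Enable process integrity checks"]
  else actions

def get_recommended_actions_py (predicted_techniques : List (List (String × String))) : List String :=
  let actions := predicted_techniques.foldl pvStepA []
  -- list(set(actions)) if actions else [...]; list(set(…)) ported as PySem.Set.ofList (set compare)
  if actions = [] then ["Continue enhanced monitoring"] else PySem.Set.ofList actions

-- ===== PORT B =====
def pvTechActions : List (String × List String) :=
  [("T1490", ["URGENT: Block access to shadow copies", "Protect backup systems immediately"]),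
   ("T1486", ["CRITICAL: Lock all sensitive folders NOW", "Isolate system from network",
              "Kill suspicious processes immediately"]),
   ("T1083", ["Monitor file system access patterns", "Enable honeypot file alerts"]),
   ("T1055", ["Monitor process creation/injection", "Enable process integrity checks"])]

-- step of B's for-loop; same tech["id"] subscript (same KeyError domain, same getD "" port)
def pvStepB (seen : List String) (tech : List (String × String)) : List String :=
  let tid := (PySem.Dict.mk tech).getD "id" ""
  if (PySem.Dict.mk pvTechActions).contains tid ∧ tid ∉ seen then seen ++ [tid] else seen

def get_recommended_actions_py_alt (predicted_techniques : List (List (String × String))) : List String :=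
  let seen := predicted_techniques.foldl pvStepB []
  if seen = [] then ["Continue enhanced monitoring"]
  else seen.flatMap (fun tid => (PySem.Dict.mk pvTechActions).getD tid [])

-- ===== PRECONDITION & SPEC =====
-- Pre_ excludes exactly the inputs where Python A raises KeyError: a technique dict without "id".
def Pre_get_recommended_actions_py (predicted_techniques : List (List (String × String))) : Prop :=
  (predicted_techniques.all (fun tech => (PySem.Dict.mk tech).contains "id")) = true
instance (predicted_techniques : List (List (String × String))) : Decidable (Pre_get_recommended_actions_py predicted_techniques) := by unfold Pre_get_recommended_actions_py; infer_instance

def pvWitness_get_recommended_actions_py : (List (List (String × String))) :=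
  [[("id", "T1486")], [("id", "T1490"), ("name", "Inhibit System Recovery")]]

def Spec_get_recommended_actions_py (predicted_techniques : List (List (String × String))) (out : List String) : Prop := out = get_recommended_actions_py_alt predicted_techniques
instance (predicted_techniques : List (List (String × String))) (out : List String) : Decidable (Spec_get_recommended_actions_py predicted_techniques out) := by unfold Spec_get_recommended_actions_py; infer_instance

-- ===== CLAIM (what is proved, stated in full; the proofs are below) =====
def Claim_equal_get_recommended_actions_py : Prop := ∀ (predicted_techniques : List (List (String × String))), Dom_get_recommended_actions_py predicted_techniques → Pre_get_recommended_actions_py predicted_techniques → Spec_get_recommended_actions_py predicted_techniques (get_recommended_actions_py predicted_techniques)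

-- ===== LEMMAS AND PROOFS =====

-- the action block of branch i of A's ladder (4 = no branch)
def pvBlock : Nat → List String
  | 0 => ["URGENT: Block access to shadow copies", "Protect backup systems immediately"]
  | 1 => ["CRITICAL: Lock all sensitive folders NOW", "Isolate system from network",
          "Kill suspicious processes immediately"]
  | 2 => ["Monitor file system access patterns", "Enable honeypot file alerts"]
  | 3 => ["Monitor process creation/injection", "Enable process integrity checks"]
  | _ => []

-- which branch of A's ladder the id string takes
def pvCls (s : String) : Nat :=
  if s = "T1490" then 0 else if s = "T1486" then 1 else if s = "T1083" then 2
  else if s = "T1055" then 3 else 4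

def pvKey (tech : List (String × String)) : String := (PySem.Dict.mk tech).getD "id" ""

lemma pvCls_le (s : String) : pvCls s ≤ 4 := by
  unfold pvCls; split_ifs <;> omega

lemma pvCls_inj {a b : String} (h : pvCls a = pvCls b) (h4 : pvCls a < 4) : a = b := by
  unfold pvCls at h h4; split_ifs at h h4 <;> simp_all

lemma pvBlock_eq_nil_iff {i : Nat} (hi : i ≤ 4) : pvBlock i = [] ↔ i = 4 := by
  interval_cases i <;> simp [pvBlock]

lemma pvBlock_nodup (i : Nat) : (pvBlock i).Nodup := by
  match i with
  | 0 | 1 | 2 | 3 => decide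
  | (n+4) => exact List.Pairwise.nil

lemma pvBlock_disj {i j : Nat} (hi : i ≤ 4) (hj : j ≤ 4) (hne : i ≠ j) :
    ∀ x ∈ pvBlock i, x ∉ pvBlock j := by
  interval_cases i <;> interval_cases j <;> simp_all <;> decide

lemma pvCls_eq_four {s : String} (h1 : ¬s = "T1490") (h2 : ¬s = "T1486")
    (h3 : ¬s = "T1083") (h4 : ¬s = "T1055") : pvCls s = 4 := by
  unfold pvCls; simp [h1, h2, h3, h4]

lemma stepA_eq (acc : List String) (tech : List (String × String)) :
    pvStepA acc tech = acc ++ pvBlock (pvCls (pvKey tech)) := by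
  simp only [pvStepA, pvKey, pvCls]
  split_ifs <;> simp_all [pvBlock]

lemma contains_tbl (s : String) :
    (PySem.Dict.mk pvTechActions).contains s = decide (pvCls s < 4) := by
  by_cases h1 : s = "T1490"
  · subst h1; decide
  by_cases h2 : s = "T1486"
  · subst h2; decide
  by_cases h3 : s = "T1083"
  · subst h3; decide
  by_cases h4 : s = "T1055"
  · subst h4; decide
  rw [pvCls_eq_four h1 h2 h3 h4]
  simp [pvTechActions, Ne.symm h1, Ne.symm h2, Ne.symm h3, Ne.symm h4]

lemma getD_tbl (s : String) :
    (PySem.Dict.mk pvTechActions).getD s [] = pvBlock (pvCls s) := by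
  by_cases h1 : s = "T1490"
  · subst h1; decide
  by_cases h2 : s = "T1486"
  · subst h2; decide
  by_cases h3 : s = "T1083"
  · subst h3; decide
  by_cases h4 : s = "T1055"
  · subst h4; decide
  have h5 := pvCls_eq_four h1 h2 h3 h4
  rw [h5]
  simp [pvTechActions, PySem.Dict.getD_eq_get?_getD,
        Ne.symm h1, Ne.symm h2, Ne.symm h3, Ne.symm h4, pvBlock, PySem.Dict.get?]

def pvG (seen : List String) (s : String) : List String :=
  if pvCls s < 4 ∧ s ∉ seen then seen ++ [s] else seen

lemma stepB_eq (seen : List String) (tech : List (String × String)) :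
    pvStepB seen tech = pvG seen (pvKey tech) := by
  simp only [pvStepB, pvG, pvKey, contains_tbl]
  by_cases h : pvCls ((PySem.Dict.mk tech).getD "id" "") < 4 <;>
    by_cases hm : ((PySem.Dict.mk tech).getD "id" "") ∈ seen <;>
    simp [h, hm]

lemma foldA (pts : List (List (String × String))) : ∀ acc,
    pts.foldl pvStepA acc = acc ++ (pts.map pvKey).flatMap (fun s => pvBlock (pvCls s)) := by
  induction pts with
  | nil => simp
  | cons t ts ih => intro acc; simp [List.foldl_cons, stepA_eq, ih]

lemma foldB (pts : List (List (String × String))) : ∀ seen,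
    pts.foldl pvStepB seen = (pts.map pvKey).foldl pvG seen := by
  induction pts with
  | nil => simp
  | cons t ts ih => intro seen; simp [List.foldl_cons, stepB_eq, ih]

-- adding only fresh, duplicate-free elements to a set appends them
lemma foldl_add_fresh (ys : List String) : ∀ (s : List String), ys.Nodup →
    (∀ y ∈ ys, y ∉ s) → List.foldl PySem.Set.add s ys = s ++ ys := by
  induction ys with
  | nil => simp
  | cons y ys ih =>
    intro s hnd hf
    have hy : y ∉ s := hf y (by simp)
    have : PySem.Set.add s y = s ++ [y] := by
      simp [PySem.Set.add, PySem.Set.contains, hy]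
    rw [List.foldl_cons, this, ih (s ++ [y]) hnd.of_cons]
    · simp
    · intro z hz
      simp only [List.mem_append, List.mem_singleton]
      rintro (h | rfl)
      · exact hf z (by simp [hz]) h
      · exact (List.nodup_cons.mp hnd).1 hz

-- adding only already-present elements leaves a set unchanged
lemma foldl_add_mem (ys : List String) : ∀ (s : List String),
    (∀ y ∈ ys, y ∈ s) → List.foldl PySem.Set.add s ys = s := by
  induction ys with
  | nil => simp
  | cons y ys ih =>
    intro s hm
    have : PySem.Set.add s y = s := by
      simp [PySem.Set.add, PySem.Set.contains, hm y (by simp)]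
    rw [List.foldl_cons, this, ih s (fun z hz => hm z (by simp [hz]))]

lemma main_lemma (ks : List String) : ∀ (seen : List String),
    (∀ t ∈ seen, pvCls t < 4) → seen.Nodup →
    List.foldl PySem.Set.add (seen.flatMap (fun s => pvBlock (pvCls s)))
        (ks.flatMap (fun s => pvBlock (pvCls s)))
      = (ks.foldl pvG seen).flatMap (fun s => pvBlock (pvCls s)) := by
  induction ks with
  | nil => intro seen _ _; simp
  | cons k ks ih =>
    intro seen hlt hnd
    rw [List.flatMap_cons, List.foldl_append, List.foldl_cons]
    by_cases h4 : pvCls k < 4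
    · by_cases hm : k ∈ seen
      · have hg : pvG seen k = seen := by simp [pvG, hm]
        have habs : List.foldl PySem.Set.add (seen.flatMap (fun s => pvBlock (pvCls s)))
            (pvBlock (pvCls k)) = seen.flatMap (fun s => pvBlock (pvCls s)) := by
          apply foldl_add_mem
          intro y hy
          exact List.mem_flatMap.mpr ⟨k, hm, hy⟩
        rw [habs, hg, ih seen hlt hnd]
      · have hg : pvG seen k = seen ++ [k] := by simp [pvG, hm, h4]
        have hfresh : ∀ y ∈ pvBlock (pvCls k),
            y ∉ seen.flatMap (fun s => pvBlock (pvCls s)) := by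
          intro y hy hmem
          rcases List.mem_flatMap.mp hmem with ⟨t, ht, hyt⟩
          by_cases he : pvCls k = pvCls t
          · exact hm (pvCls_inj he h4 ▸ ht)
          · exact pvBlock_disj (pvCls_le k) (pvCls_le t) he y hy hyt
        rw [foldl_add_fresh _ _ (pvBlock_nodup _) hfresh, hg]
        have := ih (seen ++ [k])
            (by intro t ht; rcases List.mem_append.mp ht with h | h
                · exact hlt t h
                · simp at h; subst h; exact h4)
            (by simp [List.nodup_append, hnd]
                intro a ha hak
                exact hm (hak ▸ ha))
        rw [← this]
        simp
    · have h44 : pvCls k = 4 := by have := pvCls_le k; omega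
      have : pvBlock (pvCls k) = [] := by rw [h44]; rfl
      rw [this]
      have hg : pvG seen k = seen := by simp [pvG, h4]
      rw [hg]
      exact ih seen hlt hnd

lemma foldG_nil (ks : List String) : ∀ seen, (∀ s ∈ ks, pvCls s = 4) →
    ks.foldl pvG seen = seen := by
  induction ks with
  | nil => simp
  | cons k ks ih =>
    intro seen h
    have : pvG seen k = seen := by
      have := h k (by simp); simp [pvG, this]
    rw [List.foldl_cons, this]
    exact ih seen (fun s hs => h s (by simp [hs]))

-- ===== VERDICT (by name: the statement is the Claim_ definition above) =====
theorem get_recommended_actions_py_spec : Claim_equal_get_recommended_actions_py := by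
  intro pts _ _
  unfold Spec_get_recommended_actions_py
  unfold get_recommended_actions_py get_recommended_actions_py_alt
  rw [foldA, foldB]
  simp only [List.nil_append]
  set ks := pts.map pvKey with hks
  by_cases hempty : ks.flatMap (fun s => pvBlock (pvCls s)) = []
  · have hall : ∀ s ∈ ks, pvCls s = 4 := by
      intro s hs
      have : pvBlock (pvCls s) = [] := by
        rcases List.flatMap_eq_nil_iff.mp hempty s hs with h
        exact h
      exact (pvBlock_eq_nil_iff (pvCls_le s)).mp this
    rw [hempty, foldG_nil ks [] hall]
    simp
  · have hmain := main_lemma ks [] (by simp) (by simp)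
    simp only [List.flatMap_nil] at hmain
    have hset : PySem.Set.ofList (ks.flatMap (fun s => pvBlock (pvCls s)))
        = (ks.foldl pvG []).flatMap (fun s => pvBlock (pvCls s)) := by
      rw [PySem.Set.ofList_eq_foldl]; exact hmain
    have hseen : ks.foldl pvG [] ≠ [] := by
      intro h0
      rw [h0] at hset
      simp only [List.flatMap_nil] at hset
      apply hempty
      have : ∀ x, x ∉ ks.flatMap (fun s => pvBlock (pvCls s)) := by
        intro x hx
        have : x ∈ PySem.Set.ofList (ks.flatMap (fun s => pvBlock (pvCls s))) := by
          simp [PySem.Set.mem_ofList, hx]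
        rw [hset] at this
        exact absurd this (List.not_mem_nil)
      exact List.eq_nil_iff_forall_not_mem.mpr this
    rw [if_neg hempty, if_neg hseen, hset]
    simp only [getD_tbl]
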